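-- pv_equiv track=rewrite | github.com/GEM-benchmark/NL-Augmenter | transformations/longer_location_ner/transformation.py | extract_tag_indexes
-- ===== SOURCE A (Python) =====
-- def extract_tag_indexes(tag_seq, b_tag, i_tag):
--     """
--     Returns index of B-LOC and I-LOC, I-LOC = -1 if no I-LOC exist
--     """
--     i_tag_index = -1  # default value
--     b_tag_index = tag_seq.index(b_tag)
--     if b_tag_index == len(tag_seq) - 1:
--         i_tag_index = b_tag_index
--         return b_tag_index, i_tag_index  # case when B-LOC at the end of tag_sequence", no I-LOC
--     if tag_seq[b_tag_index + 1] == "O":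
--         i_tag_index = b_tag_index  # case when B-LOC in the middle but no "I-LOC"
--         return b_tag_index, i_tag_index
--     else:
--         for i in range(b_tag_index + 1, len(tag_seq)):
--             if tag_seq[i] == i_tag:
--                 i_tag_index = i  # return index of last I-LOC
--         return b_tag_index, i_tag_index
-- ===== SOURCE B (Python) =====
-- def extract_tag_indexes(tag_seq, b_tag, i_tag):
--     b = tag_seq.index(b_tag)
--     if b == len(tag_seq) - 1 or tag_seq[b + 1] == "O":
--         return b, b
--     for i in range(len(tag_seq) - 1, b, -1):
--         if tag_seq[i] == i_tag:
--             return b, i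
--     return b, -1
-- ===== Notes on version B (the rewrite author's own statement) =====
-- stated objective: simpler
-- what changed: The two base cases are merged into one short-circuit guard, and the last I-tag is found by scanning the suffix backward with an early return instead of scanning forward while overwriting a last-seen variable.
import Mathlib
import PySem

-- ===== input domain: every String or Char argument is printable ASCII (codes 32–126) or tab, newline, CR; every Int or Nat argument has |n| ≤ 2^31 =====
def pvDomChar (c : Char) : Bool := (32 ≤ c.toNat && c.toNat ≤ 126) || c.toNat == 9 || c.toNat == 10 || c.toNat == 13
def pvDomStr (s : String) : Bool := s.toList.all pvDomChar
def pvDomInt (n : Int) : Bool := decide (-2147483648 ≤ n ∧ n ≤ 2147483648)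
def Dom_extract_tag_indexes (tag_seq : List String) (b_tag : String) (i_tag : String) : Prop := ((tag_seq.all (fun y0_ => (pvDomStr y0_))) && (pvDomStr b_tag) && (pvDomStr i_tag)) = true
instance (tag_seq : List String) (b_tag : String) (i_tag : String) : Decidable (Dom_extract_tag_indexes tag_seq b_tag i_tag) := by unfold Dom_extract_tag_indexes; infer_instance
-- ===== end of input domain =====

-- B merges the two base cases into one short-circuit guard and finds the last I-tag by a
-- backward scan of the suffix with early exit, instead of A's forward overwrite loop (same cost).


-- ===== PORT A =====
def extract_tag_indexes (tag_seq : List String) (b_tag : String) (i_tag : String) : Int × Int :=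
  match PySem.List.index? tag_seq b_tag with
  | none => (-1, -1)   -- Python raises ValueError here; excluded by Pre_
  | some bN =>
    let b : Int := bN
    if b == PySem.List.len tag_seq - 1 then (b, b)
    else if PySem.List.pyGetD tag_seq (b + 1) "" == "O" then (b, b)
    else
      (b, (PySem.List.pyRange (b + 1) (PySem.List.len tag_seq) 1).foldl
            (fun acc i => if PySem.List.pyGetD tag_seq i "" == i_tag then i else acc) (-1))

-- ===== PORT B =====
-- the backward for-loop of Source B with its early return: returns the first i in (b, start] (from the top) matching i_tag, else -1
def pvBackScan (tag_seq : List String) (i_tag : String) (b : Int) (i : Int) : Int :=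
  if i ≤ b then -1
  else if PySem.List.pyGetD tag_seq i "" == i_tag then i
  else pvBackScan tag_seq i_tag b (i - 1)
termination_by (i - b).toNat
decreasing_by omega

def extract_tag_indexes_alt (tag_seq : List String) (b_tag : String) (i_tag : String) : Int × Int :=
  match PySem.List.index? tag_seq b_tag with
  | none => (-1, -1)   -- Python raises ValueError here; excluded by Pre_
  | some bN =>
    let b : Int := bN
    if b == PySem.List.len tag_seq - 1 || PySem.List.pyGetD tag_seq (b + 1) "" == "O" then (b, b)
    else (b, pvBackScan tag_seq i_tag b (PySem.List.len tag_seq - 1))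

-- ===== PRECONDITION & SPEC =====
-- Pre_ excludes exactly the inputs where tag_seq.index(b_tag) raises ValueError (b_tag not in tag_seq)
def Pre_extract_tag_indexes (tag_seq : List String) (b_tag : String) (i_tag : String) : Prop := b_tag ∈ tag_seq
instance (tag_seq : List String) (b_tag : String) (i_tag : String) : Decidable (Pre_extract_tag_indexes tag_seq b_tag i_tag) := by unfold Pre_extract_tag_indexes; infer_instance
def pvWitness_extract_tag_indexes : List String × String × String := (["B-LOC", "I-LOC", "O"], "B-LOC", "I-LOC")

def Spec_extract_tag_indexes (tag_seq : List String) (b_tag : String) (i_tag : String) (out : Int × Int) : Prop := out = extract_tag_indexes_alt tag_seq b_tag i_tag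
instance (tag_seq : List String) (b_tag : String) (i_tag : String) (out : Int × Int) : Decidable (Spec_extract_tag_indexes tag_seq b_tag i_tag out) := by unfold Spec_extract_tag_indexes; infer_instance

-- ===== CLAIM (what is proved, stated in full; the proofs are below) =====
def Claim_equal_extract_tag_indexes : Prop := ∀ (tag_seq : List String) (b_tag : String) (i_tag : String), Dom_extract_tag_indexes tag_seq b_tag i_tag → Pre_extract_tag_indexes tag_seq b_tag i_tag → Spec_extract_tag_indexes tag_seq b_tag i_tag (extract_tag_indexes tag_seq b_tag i_tag)

-- ===== LEMMAS AND PROOFS =====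

-- the forward last-match fold over range(b+1, n) equals the backward early-exit scan from n-1 down to b+1
lemma fold_eq_backScan (tag_seq : List String) (i_tag : String) (b : Int) :
    ∀ (k : Nat) (n : Int), (n - b - 1).toNat = k →
      (PySem.List.pyRange (b + 1) n 1).foldl
          (fun acc i => if PySem.List.pyGetD tag_seq i "" = i_tag then i else acc) (-1)
        = pvBackScan tag_seq i_tag b (n - 1) := by
  intro k
  induction k with
  | zero =>
    intro n hn
    have hle : n ≤ b + 1 := by omega
    rw [PySem.List.pyRange_one_eq_nil hle]
    rw [pvBackScan]
    simp [show n - 1 ≤ b by omega]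
  | succ k ih =>
    intro n hn
    have hlt : b + 1 ≤ n - 1 := by omega
    have hsplit : PySem.List.pyRange (b + 1) n 1
        = PySem.List.pyRange (b + 1) (n - 1) 1 ++ [n - 1] := by
      have := PySem.List.pyRange_one_succ_right (a := b + 1) (b := n - 1) hlt
      simpa using this
    rw [hsplit, List.foldl_append]
    rw [ih (n - 1) (by omega)]
    conv_rhs => rw [pvBackScan]
    simp only [List.foldl]
    rw [if_neg (by omega : ¬ n - 1 ≤ b)]
    simp only [beq_iff_eq]

-- ===== VERDICT (by name: the statement is the Claim_ definition above) =====
theorem extract_tag_indexes_spec : Claim_equal_extract_tag_indexes := by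
  intro tag_seq b_tag i_tag _ hpre
  unfold Spec_extract_tag_indexes extract_tag_indexes extract_tag_indexes_alt
  have hsome : (PySem.List.index? tag_seq b_tag).isSome := by
    rw [PySem.List.index?_isSome_iff]; exact hpre
  obtain ⟨bN, hb⟩ := Option.isSome_iff_exists.mp hsome
  rw [hb]
  simp only [beq_iff_eq, PySem.List.len_eq]
  by_cases h1 : (bN : Int) = (tag_seq.length : Int) - 1
  · simp [h1]
  · by_cases h2 : PySem.List.pyGetD tag_seq ((bN : Int) + 1) "" = "O"
    · simp [h1, h2]
    · rw [if_neg h1, if_neg h2, if_neg (show ¬((((bN : Int) == (tag_seq.length : Int) - 1) || (PySem.List.pyGetD tag_seq ((bN : Int) + 1) "" == "O")) = true) by simp [h1, h2])]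
      rw [fold_eq_backScan tag_seq i_tag (bN : Int) (((tag_seq.length : Int) - bN - 1).toNat)
        (tag_seq.length : Int) rfl]
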